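-- pv_equiv track=rewrite | github.com/VladRudchik/mountain_ner_test_quantum | Solving_pipeline/pipeline4_fine_tuned_NER.py | convert_answer_to_words_p4
-- ===== SOURCE A (Python) =====
-- from typing import List
--
-- def convert_answer_to_words_p4(sentence: str, ner_results: List[dict]) -> List[str]:
--     """
--       Reconstructs words from token information provided by NER results.
--
--       This function iterates through tokens identified by the NER model and reconstructs
--       the original words based on their start and end positions in the sentence.
--
--       Parameters:
--       sentence (str): The original sentence.
--       ner_results (List[dict]): The results from NER model, containing identified tokens with their positions.
--
--       Returns:
--       List[str]: A list of reconstructed words from the sentence.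
--     """
--     words = []
--     current_word = ""
--     last_end = -1
--     # Iterate through each token information provided by NER
--     for token_info in ner_results:
--         start, end = token_info['start'], token_info['end']
--
--         # Check if the current token follows immediately after the previous token
--         if start == last_end:
--             current_word += sentence[start:end]
--         elif start == last_end + 1:
--             # If the difference in indices is one, it represents a space
--             current_word += ' ' + sentence[start:end]
--         else:
--             # If there is a separate word, add it to the list
--             if current_word:
--                 words.append(current_word.strip())
--             current_word = sentence[start:end]
--
--         last_end = end
--
--     # Add the last collected word if it exists
--     if current_word:
--         words.append(current_word.strip())
--
--     return words
-- ===== SOURCE B (Python) =====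
-- def convert_answer_to_words_p4(sentence, ner_results):
--     # Phase 1: annotate each token with how it attaches to the previous one
--     # ('cat' = adjacent, 'space' = one-apart so a space is inserted, 'new' =
--     # otherwise, i.e. it starts a fresh word), together with its text slice.
--     annotated = []
--     prev_end = -1
--     for token_info in ner_results:
--         start, end = token_info['start'], token_info['end']
--         if start == prev_end:
--             kind = 'cat'
--         elif start == prev_end + 1:
--             kind = 'space'
--         else:
--             kind = 'new'
--         annotated.append((kind, sentence[start:end]))
--         prev_end = end
--     # Phase 2: partition the annotated tokens into groups, a 'new' token
--     # beginning each group after the (possibly empty) leading group.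
--     group0 = []
--     groups = []
--     for item in annotated:
--         if item[0] == 'new':
--             groups.append([item])
--         elif groups:
--             groups[-1].append(item)
--         else:
--             group0.append(item)
--     # Phase 3: build one string per group, strip and keep the non-empty ones.
--     raw = [_join_group(group0)] + [_join_group(g) for g in groups]
--     return [w.strip() for w in raw if w]
--
-- def _join_group(group):
--     word = ""
--     for kind, piece in group:
--         word += ' ' + piece if kind == 'space' else piece
--     return word
-- ===== Notes on version B (the rewrite author's own statement) =====
-- stated objective: alternative
-- what changed: A's single interleaved loop with flush-as-you-go state (words, current_word, last_end) is replaced by a three-phase pipeline: annotate each token with its attachment kind and slice, partition the annotated tokens into groups at 'new' tokens, then join each group and strip/filter the results.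
import Mathlib
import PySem

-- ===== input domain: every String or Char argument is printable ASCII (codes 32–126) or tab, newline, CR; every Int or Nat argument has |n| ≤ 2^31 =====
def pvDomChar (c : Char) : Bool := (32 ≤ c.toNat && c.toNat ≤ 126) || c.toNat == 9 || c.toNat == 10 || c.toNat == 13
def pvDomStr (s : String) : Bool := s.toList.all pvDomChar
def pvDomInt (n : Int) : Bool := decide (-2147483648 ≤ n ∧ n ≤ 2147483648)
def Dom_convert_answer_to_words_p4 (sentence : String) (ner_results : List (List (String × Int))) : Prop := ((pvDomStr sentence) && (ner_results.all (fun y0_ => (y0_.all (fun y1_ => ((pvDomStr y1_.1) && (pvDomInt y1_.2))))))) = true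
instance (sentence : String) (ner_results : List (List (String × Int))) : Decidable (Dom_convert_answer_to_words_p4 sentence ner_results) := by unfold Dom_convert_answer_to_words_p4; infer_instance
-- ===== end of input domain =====

-- B replaces A's interleaved flush-as-you-go loop by a three-phase pipeline
-- (annotate tokens, partition into groups, join/strip each group); objective:
-- alternative decomposition, same cost.


-- ===== PORT A =====
-- A's loop with state (words, current_word, last_end); the final flush is the [] case.
def pvALoop (sentence : String) (words : List String) (cw : String) (le : Int) :
    List (List (String × Int)) → List String
  | [] => if cw ≠ "" then words ++ [PySem.Str.strip cw] else words
  | t :: ts =>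
      let s := ((PySem.Dict.mk t).get? "start").getD 0
      let e := ((PySem.Dict.mk t).get? "end").getD 0
      if s = le then
        pvALoop sentence words (cw ++ PySem.Str.slice sentence (some s) (some e)) e ts
      else if s = le + 1 then
        pvALoop sentence words (cw ++ (" " ++ PySem.Str.slice sentence (some s) (some e))) e ts
      else
        pvALoop sentence (if cw ≠ "" then words ++ [PySem.Str.strip cw] else words)
          (PySem.Str.slice sentence (some s) (some e)) e ts

def convert_answer_to_words_p4 (sentence : String) (ner_results : List (List (String × Int))) : List String :=
  pvALoop sentence [] "" (-1) ner_results

-- ===== PORT B =====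
inductive PvKind | knew | kcat | kspace
deriving DecidableEq, Repr

-- Phase 1: annotate each token with how it attaches to its predecessor, plus its text slice.
def pvAnnotate (sentence : String) (le : Int) :
    List (List (String × Int)) → List (PvKind × String)
  | [] => []
  | t :: ts =>
      let s := ((PySem.Dict.mk t).get? "start").getD 0
      let e := ((PySem.Dict.mk t).get? "end").getD 0
      let k := if s = le then PvKind.kcat else if s = le + 1 then PvKind.kspace else PvKind.knew
      (k, PySem.Str.slice sentence (some s) (some e)) :: pvAnnotate sentence e ts

-- Phase 2: partition, a 'new' item starting each group after the (possibly empty) leading group;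
-- faithful to Source B's forward loop: append a fresh group, or extend the last group / group0.
def pvSplitStep (st : List (PvKind × String) × List (List (PvKind × String)))
    (x : PvKind × String) : List (PvKind × String) × List (List (PvKind × String)) :=
  if x.1 = PvKind.knew then (st.1, st.2 ++ [[x]])
  else
    match st.2 with
    | [] => (st.1 ++ [x], [])
    | gs => (st.1, gs.dropLast ++ [gs.getLast! ++ [x]])

-- Phase 3: join one group into a word.
def pvJoinGroup (g : List (PvKind × String)) : String :=
  g.foldl (fun w x => if x.1 = PvKind.kspace then w ++ (" " ++ x.2) else w ++ x.2) ""

def convert_answer_to_words_p4_alt (sentence : String) (ner_results : List (List (String × Int))) : List String :=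
  let ann := pvAnnotate sentence (-1) ner_results
  let st := ann.foldl pvSplitStep ([], [])
  let raw := pvJoinGroup st.1 :: st.2.map pvJoinGroup
  (raw.filter (fun w => w ≠ "")).map PySem.Str.strip

-- ===== PRECONDITION & SPEC =====
-- Pre_: every token dict must contain the keys 'start' and 'end'; on a dict missing one,
-- Python A raises KeyError (returns no value), so exactly those inputs are excluded.
def Pre_convert_answer_to_words_p4 (sentence : String) (ner_results : List (List (String × Int))) : Prop :=
  ∀ t ∈ ner_results, ((PySem.Dict.mk t).get? "start").isSome ∧ ((PySem.Dict.mk t).get? "end").isSome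

instance (sentence : String) (ner_results : List (List (String × Int))) : Decidable (Pre_convert_answer_to_words_p4 sentence ner_results) := by unfold Pre_convert_answer_to_words_p4; infer_instance

def pvWitness_convert_answer_to_words_p4 : String × (List (List (String × Int))) :=
  ("ab cd", [[("start", 0), ("end", 2)], [("start", 3), ("end", 5)]])

def Spec_convert_answer_to_words_p4 (sentence : String) (ner_results : List (List (String × Int))) (out : List String) : Prop := out = convert_answer_to_words_p4_alt sentence ner_results
instance (sentence : String) (ner_results : List (List (String × Int))) (out : List String) : Decidable (Spec_convert_answer_to_words_p4 sentence ner_results out) := by unfold Spec_convert_answer_to_words_p4; infer_instance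

-- ===== CLAIM (what is proved, stated in full; the proofs are below) =====
def Claim_equal_convert_answer_to_words_p4 : Prop := ∀ (sentence : String) (ner_results : List (List (String × Int))), Dom_convert_answer_to_words_p4 sentence ner_results → Pre_convert_answer_to_words_p4 sentence ner_results → Spec_convert_answer_to_words_p4 sentence ner_results (convert_answer_to_words_p4 sentence ner_results)

-- ===== LEMMAS AND PROOFS =====

-- proof-side backward split: same partition as phase 2's forward loop
def pvSplitB : List (PvKind × String) → List (PvKind × String) × List (List (PvKind × String))
  | [] => ([], [])
  | x :: rest =>
      let p := pvSplitB rest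
      if x.1 = PvKind.knew then ([], (x :: p.1) :: p.2) else (x :: p.1, p.2)

lemma pvGetLast!_concat (gs : List (List (PvKind × String))) (gl : List (PvKind × String)) :
    (gs ++ [gl]).getLast! = gl := by
  induction gs with
  | nil => rfl
  | cons a rest ih =>
    rcases rest with _ | ⟨b, c⟩ <;> simpa [List.getLast!] using ih

lemma pvSplit_fold_eq_aux (ann : List (PvKind × String)) :
    (∀ g0, ann.foldl pvSplitStep (g0, []) = (g0 ++ (pvSplitB ann).1, (pvSplitB ann).2)) ∧
    (∀ g0 gs gl, ann.foldl pvSplitStep (g0, gs ++ [gl]) =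
      (g0, gs ++ ((gl ++ (pvSplitB ann).1) :: (pvSplitB ann).2))) := by
  induction ann with
  | nil => simp [pvSplitB]
  | cons x rest ih =>
    constructor
    · intro g0
      by_cases h : x.1 = PvKind.knew
      · simp only [List.foldl_cons, pvSplitStep, h, if_true, pvSplitB]
        rw [show ([] : List (List (PvKind × String))) ++ [[x]] = [] ++ [[x]] from rfl,
            ih.2 g0 [] [x]]
        simp
      · simp only [List.foldl_cons, pvSplitStep, h, if_false, pvSplitB]
        rw [ih.1 (g0 ++ [x])]
        simp
    · intro g0 gs gl
      by_cases h : x.1 = PvKind.knew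
      · simp only [List.foldl_cons, pvSplitStep, h, pvSplitB, reduceIte]
        rw [ih.2 g0 (gs ++ [gl]) [x]]
        simp
      · simp only [List.foldl_cons, pvSplitStep, h, pvSplitB, reduceIte]
        have hne : gs ++ [gl] ≠ [] := by simp
        rcases hh : gs ++ [gl] with _ | ⟨a, b⟩
        · exact absurd hh hne
        · rw [← hh]
          simp only [List.dropLast_concat, pvGetLast!_concat]
          rw [ih.2 g0 gs (gl ++ [x])]
          simp

lemma pvSplit_fold_eq (ann : List (PvKind × String)) :
    ann.foldl pvSplitStep ([], []) = pvSplitB ann := by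
  have h := (pvSplit_fold_eq_aux ann).1 []
  simpa using h

-- B's pipeline with an open current word cw joined onto the leading group
def pvPipeOpen (cw : String) (ann : List (PvKind × String)) : List String :=
  let p := pvSplitB ann
  ((List.foldl (fun w x => if x.1 = PvKind.kspace then w ++ (" " ++ x.2) else w ++ x.2) cw p.1
      :: p.2.map pvJoinGroup).filter (fun w => w ≠ "")).map PySem.Str.strip

lemma pvALoop_words (sentence : String) (ts : List (List (String × Int))) :
    ∀ words cw le, pvALoop sentence words cw le ts = words ++ pvALoop sentence [] cw le ts := by
  induction ts with
  | nil => intro words cw le; by_cases h : cw = "" <;> simp [pvALoop, h]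
  | cons t ts ih =>
    intro words cw le
    simp only [pvALoop]
    split_ifs with h1 h2 h3
    · rw [ih]
    · rw [ih]
    · rw [ih (words ++ [PySem.Str.strip cw]), ih ([] ++ [PySem.Str.strip cw])]
      simp
    · rw [ih, ih]

lemma pvALoop_eq_pipe (sentence : String) (ts : List (List (String × Int))) :
    ∀ cw le, pvALoop sentence [] cw le ts = pvPipeOpen cw (pvAnnotate sentence le ts) := by
  induction ts with
  | nil =>
    intro cw le
    by_cases h : cw = "" <;>
      simp [pvALoop, pvAnnotate, pvPipeOpen, pvSplitB, List.filter, h]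
  | cons t ts ih =>
    intro cw le
    simp only [pvALoop, pvAnnotate]
    set s := ((PySem.Dict.mk t).get? "start").getD 0 with hs
    set e := ((PySem.Dict.mk t).get? "end").getD 0 with he
    by_cases h1 : s = le
    · rw [if_pos h1, ih]
      simp [pvPipeOpen, pvSplitB, h1]
    · by_cases h2 : s = le + 1
      · rw [if_neg h1, if_pos h2, ih]
        have hk : (if s = le then PvKind.kcat else if s = le + 1 then PvKind.kspace else PvKind.knew)
            = PvKind.kspace := by simp [h2]
        simp [pvPipeOpen, pvSplitB, hk]
      · rw [if_neg h1, if_neg h2, pvALoop_words, ih]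
        have hk : (if s = le then PvKind.kcat else if s = le + 1 then PvKind.kspace else PvKind.knew)
            = PvKind.knew := by simp [h1, h2]
        by_cases h : cw = "" <;>
          simp [pvPipeOpen, pvSplitB, hk, pvJoinGroup, List.filter, h]

-- ===== VERDICT (by name: the statement is the Claim_ definition above) =====
theorem convert_answer_to_words_p4_spec : Claim_equal_convert_answer_to_words_p4 := by
  intro sentence ner_results _ _
  show convert_answer_to_words_p4 sentence ner_results = convert_answer_to_words_p4_alt sentence ner_results
  unfold convert_answer_to_words_p4
  rw [pvALoop_eq_pipe]
  simp only [convert_answer_to_words_p4_alt, pvSplit_fold_eq, pvPipeOpen, pvJoinGroup]
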